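-- pv_equiv track=rewrite | github.com/andreasturesson/Thesis-Project | Dataset/ensemble_process_training_data.py | pair_number_letter
-- ===== SOURCE A (Python) =====
-- def pair_number_letter(string):
--     counter = 0
--
--     for idx, char in enumerate(string):
--         if (int(ord(char)) >= 48 and int(ord(char)) <= 57):
--             if idx != len(string)-1:
--                 if (int(ord(string[idx+1])) >= 97 and int(ord(string[idx+1])) <= 122):
--                     counter += 1
--     return counter
-- ===== SOURCE B (Python) =====
-- import re
--
-- _PAIR = re.compile(r'[0-9][a-z]')
--
-- def pair_number_letter(string):
--     return len(_PAIR.findall(string))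
-- ===== Notes on version B (the rewrite author's own statement) =====
-- stated objective: idiomatic
-- what changed: Replaces the manual enumerate loop with ord-range tests by a single regex scan: len(re.findall(r'[0-9][a-z]', string)); non-overlapping matches are safe because a lowercase letter can never start another digit-letter pair.
import Mathlib
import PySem

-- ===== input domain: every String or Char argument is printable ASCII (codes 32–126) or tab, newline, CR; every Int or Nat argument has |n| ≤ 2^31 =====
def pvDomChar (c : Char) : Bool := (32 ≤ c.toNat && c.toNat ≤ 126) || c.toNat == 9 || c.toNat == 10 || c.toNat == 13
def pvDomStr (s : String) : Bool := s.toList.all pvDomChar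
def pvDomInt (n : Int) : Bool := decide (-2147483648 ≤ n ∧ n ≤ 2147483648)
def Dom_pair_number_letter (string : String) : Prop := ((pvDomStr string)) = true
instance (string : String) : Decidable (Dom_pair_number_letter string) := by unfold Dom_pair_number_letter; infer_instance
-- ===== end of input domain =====

-- B replaces A's index-based enumerate loop by a single non-overlapping regex scan
-- (re.findall(r'[0-9][a-z]')) — same count, more idiomatic.


-- ===== PORT A =====
-- Literal port of A: fold the counter over enumerate(string); string[idx+1] is PySem.List.pyGet?
-- (the guard idx != len(string)-1 makes the lookup always succeed, so the none branch is unreachable).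
def pvStepA (l : List Char) (counter : Int) (p : Int × Char) : Int :=
  if 48 ≤ p.2.toNat ∧ p.2.toNat ≤ 57 then
    if p.1 ≠ (l.length : Int) - 1 then
      match PySem.List.pyGet? l (p.1 + 1) with
      | some c2 => if 97 ≤ c2.toNat ∧ c2.toNat ≤ 122 then counter + 1 else counter
      | none => counter
    else counter
  else counter

def pair_number_letter (string : String) : Int :=
  (PySem.List.enumerate string.toList 0).foldl (pvStepA string.toList) 0

-- ===== PORT B =====
-- Port of B's regex scan: re.findall(r'[0-9][a-z]') moves left to right, consuming two
-- characters on a match and one otherwise; we count the matches. Exact for this pattern.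
def pvRegexScan : List Char → Int
  | c1 :: c2 :: rest =>
      if (48 ≤ c1.toNat ∧ c1.toNat ≤ 57) ∧ (97 ≤ c2.toNat ∧ c2.toNat ≤ 122) then
        1 + pvRegexScan rest
      else
        pvRegexScan (c2 :: rest)
  | _ => 0

def pair_number_letter_alt (string : String) : Int :=
  pvRegexScan string.toList

-- ===== PRECONDITION & SPEC =====
def Spec_pair_number_letter (string : String) (out : Int) : Prop := out = pair_number_letter_alt string
instance (string : String) (out : Int) : Decidable (Spec_pair_number_letter string out) := by unfold Spec_pair_number_letter; infer_instance

-- ===== CLAIM (what is proved, stated in full; the proofs are below) =====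
def Claim_equal_pair_number_letter : Prop := ∀ (string : String), Dom_pair_number_letter string → Spec_pair_number_letter string (pair_number_letter string)

-- ===== LEMMAS AND PROOFS =====

-- adjacent-pair count, the common characterisation of both ports
def pvPairCount : List Char → Int
  | a :: b :: rest =>
      (if (48 ≤ a.toNat ∧ a.toNat ≤ 57) ∧ (97 ≤ b.toNat ∧ b.toNat ≤ 122) then 1 else 0)
        + pvPairCount (b :: rest)
  | _ => 0

theorem pvPairCount_not_digit {b : Char} (hb : ¬ (48 ≤ b.toNat ∧ b.toNat ≤ 57))
    (rest : List Char) : pvPairCount (b :: rest) = pvPairCount rest := by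
  cases rest with
  | nil => simp [pvPairCount]
  | cons d r => simp [pvPairCount, hb]

theorem pvRegexScan_eq_pairCount (l : List Char) : pvRegexScan l = pvPairCount l := by
  induction l using pvRegexScan.induct with
  | case1 c1 c2 rest h ih =>
      have hnd : ¬ (48 ≤ c2.toNat ∧ c2.toNat ≤ 57) := by omega
      rw [show pvRegexScan (c1 :: c2 :: rest) = 1 + pvRegexScan rest by simp [pvRegexScan, h]]
      rw [show pvPairCount (c1 :: c2 :: rest)
            = 1 + pvPairCount (c2 :: rest) by simp [pvPairCount, h]]
      rw [pvPairCount_not_digit hnd rest, ih]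
  | case2 c1 c2 rest h ih =>
      rw [show pvRegexScan (c1 :: c2 :: rest) = pvRegexScan (c2 :: rest) by
            simp [pvRegexScan, h]]
      rw [show pvPairCount (c1 :: c2 :: rest) = 0 + pvPairCount (c2 :: rest) by
            simp [pvPairCount, h]]
      rw [ih]; ring
  | case3 l h1 =>
      match l with
      | [] => simp [pvRegexScan, pvPairCount]
      | [c] => simp [pvRegexScan, pvPairCount]
      | c1 :: c2 :: r => exact absurd rfl (h1 c1 c2 r)

-- the loop invariant for A's fold: folding over the enumerated suffix adds pvPairCount of it
theorem pvFoldA_aux (suf : List Char) : ∀ (pre : List Char) (acc : Int),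
    (PySem.List.enumerate suf (pre.length : Int)).foldl (pvStepA (pre ++ suf)) acc
      = acc + pvPairCount suf := by
  induction suf with
  | nil => intro pre acc; simp [PySem.List.enumerate_nil, pvPairCount]
  | cons c rest ih =>
      intro pre acc
      rw [PySem.List.enumerate_cons, List.foldl_cons]
      cases rest with
      | nil =>
          have hstep : pvStepA (pre ++ [c]) acc ((pre.length : Int), c) = acc := by
            simp [pvStepA]
          rw [hstep]
          simp [PySem.List.enumerate_nil, pvPairCount]
      | cons b r =>
          have hget : PySem.List.pyGet? (pre ++ c :: b :: r) ((pre.length : Int) + 1)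
              = some b := by
            have := PySem.List.pyGet?_append_right (pre := pre) (ys := c :: b :: r) (k := 1)
            simpa using this
          have hne : (pre.length : Int) ≠ (((pre ++ c :: b :: r).length : Nat) : Int) - 1 := by
            simp; omega
          have hstep : pvStepA (pre ++ c :: b :: r) acc ((pre.length : Int), c)
              = acc + (if (48 ≤ c.toNat ∧ c.toNat ≤ 57) ∧ (97 ≤ b.toNat ∧ b.toNat ≤ 122)
                        then 1 else 0) := by
            by_cases hd : 48 ≤ c.toNat ∧ c.toNat ≤ 57
            · by_cases hl : 97 ≤ b.toNat ∧ b.toNat ≤ 122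
              · simp [pvStepA, hd, hl, hget]
                omega
              · simp [pvStepA, hd, hl, hget]
            · simp [pvStepA, hd]
          rw [hstep]
          rw [show pre ++ c :: b :: r = (pre ++ [c]) ++ (b :: r) by simp,
              show ((pre.length : Int) + 1) = (((pre ++ [c]).length : Nat) : Int) by simp]
          rw [ih (pre ++ [c])]
          rw [show pvPairCount (c :: b :: r)
                = (if (48 ≤ c.toNat ∧ c.toNat ≤ 57) ∧ (97 ≤ b.toNat ∧ b.toNat ≤ 122)
                    then 1 else 0) + pvPairCount (b :: r) by rfl]
          ring

-- ===== VERDICT (by name: the statement is the Claim_ definition above) =====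
theorem pair_number_letter_spec : Claim_equal_pair_number_letter := by
  intro s _
  unfold Spec_pair_number_letter pair_number_letter pair_number_letter_alt
  have h := pvFoldA_aux s.toList [] 0
  simpa [pvRegexScan_eq_pairCount] using h
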